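-- pv_equiv track=rewrite | github.com/TeaDuke/ProjectPixels | utilits/filename_utilits.py | check_filename
-- ===== SOURCE A (Python) =====
-- symbols = [
--     '/',
--     '>',
--     '<',
--     ':',
--     '\\',
--     '|',
--     '?',
--     '*'
-- ]
--
-- names = [
--     "CON",
--     "PRN",
--     "AUX",
--     "NUL",
--     "COM1",
--     "COM2",
--     "COM3",
--     "COM4",
--     "COM5",
--     "COM6",
--     "COM7",
--     "COM8",
--     "COM9",
--     "LPT1",
--     "LPT2",
--     "LPT3",
--     "LPT4",
--     "LPT5",
--     "LPT6",
--     "LPT7",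
--     "LPT8",
--     "LPT9"
-- ]
--
-- def check_filename(filename: str):
--     for symbol in symbols:
--         if symbol in filename:
--             return False
--     for name in names:
--         if filename.lower() == name.lower():
--             return False
--
--     return True
-- ===== SOURCE B (Python) =====
-- def check_filename(filename: str):
--     for c in filename:
--         if c in '/><:\\|?*':
--             return False
--     low = filename.lower()
--     if low in ("con", "prn", "aux", "nul"):
--         return False
--     if len(low) == 4 and low[:3] in ("com", "lpt") and low[3] in "123456789":
--         return False
--     return True
-- ===== Notes on version B (the rewrite author's own statement) =====
-- stated objective: alternative
-- what changed: B scans the filename's characters once against the symbol string instead of scanning the filename once per symbol, and replaces A's 22 case-insensitive name comparisons by a structural classification of the lowercased filename (one of the four 3-letter device names, or length 4 with prefix 'com'/'lpt' and a final digit 1-9).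
import Mathlib
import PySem

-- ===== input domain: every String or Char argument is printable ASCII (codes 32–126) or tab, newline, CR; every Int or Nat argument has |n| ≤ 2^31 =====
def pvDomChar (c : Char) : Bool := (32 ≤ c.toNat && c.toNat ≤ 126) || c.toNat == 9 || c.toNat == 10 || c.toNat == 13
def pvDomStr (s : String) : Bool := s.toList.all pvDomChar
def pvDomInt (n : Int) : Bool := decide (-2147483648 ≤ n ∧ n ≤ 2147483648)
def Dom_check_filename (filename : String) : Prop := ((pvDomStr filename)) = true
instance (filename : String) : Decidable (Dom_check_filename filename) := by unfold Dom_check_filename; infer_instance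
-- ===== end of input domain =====

-- B replaces A's per-symbol substring scans by one pass over the filename's characters, and
-- A's 22 case-insensitive name comparisons by a structural classification of the lowercased
-- filename ('con'/'prn'/'aux'/'nul', or length 4 with prefix 'com'/'lpt' and a final digit 1-9)
-- (objective: alternative).

-- ===== PORT A =====
def pySymbols : List String := ["/", ">", "<", ":", "\\", "|", "?", "*"]

def pyNames : List String :=
  ["CON", "PRN", "AUX", "NUL",
   "COM1", "COM2", "COM3", "COM4", "COM5", "COM6", "COM7", "COM8", "COM9",
   "LPT1", "LPT2", "LPT3", "LPT4", "LPT5", "LPT6", "LPT7", "LPT8", "LPT9"]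

-- 'for symbol in symbols: if symbol in filename: return False' — early-return loop over symbols
def checkLoopA1 : List String → String → Bool
  | [], _ => true
  | s :: rest, f => if PySem.Str.isIn s f then false else checkLoopA1 rest f

-- 'for name in names: if filename.lower() == name.lower(): return False'
def checkLoopA2 : List String → String → Bool
  | [], _ => true
  | n :: rest, f => if PySem.Str.lower f == PySem.Str.lower n then false else checkLoopA2 rest f

def check_filename (filename : String) : Bool :=
  if checkLoopA1 pySymbols filename = false then false
  else if checkLoopA2 pyNames filename = false then false
  else true

-- ===== PORT B =====
-- the character constants of Source B, as character lists ('/><:\\|?*' and '123456789')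
def symbolCharsB : List Char := ['/', '>', '<', ':', '\\', '|', '?', '*']
def digitCharsB : List Char := ['1', '2', '3', '4', '5', '6', '7', '8', '9']

-- 'for c in filename: if c in '/><:\\|?*': return False' — early-return loop over the characters
def scanCharsB : List Char → Bool
  | [] => true
  | c :: rest => if symbolCharsB.contains c then false else scanCharsB rest

-- 'low in ("con","prn","aux","nul") or (len(low) == 4 and low[:3] in ("com","lpt") and low[3] in "123456789")'
def reservedB (low : List Char) : Bool :=
  if low = ['c','o','n'] ∨ low = ['p','r','n'] ∨ low = ['a','u','x'] ∨ low = ['n','u','l'] then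
    true
  else if low.length = 4
      ∧ (PySem.List.slice low none (some 3) = ['c','o','m'] ∨
         PySem.List.slice low none (some 3) = ['l','p','t'])
      ∧ (PySem.List.pyGet? low 3).elim false (fun d => digitCharsB.contains d) then
    true
  else false

def check_filename_alt (filename : String) : Bool :=
  if scanCharsB filename.toList = false then false
  else if reservedB (PySem.Chars.lower filename.toList) then false
  else true

-- ===== PRECONDITION & SPEC =====
def Spec_check_filename (filename : String) (out : Bool) : Prop := out = check_filename_alt filename
instance (filename : String) (out : Bool) : Decidable (Spec_check_filename filename out) := by unfold Spec_check_filename; infer_instance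

-- ===== CLAIM (what is proved, stated in full; the proofs are below) =====
def Claim_equal_check_filename : Prop := ∀ (filename : String), Dom_check_filename filename → Spec_check_filename filename (check_filename filename)

-- ===== LEMMAS AND PROOFS =====

-- the 22 reserved names, lowered
def lowNamesB : List (List Char) :=
  ["con".toList, "prn".toList, "aux".toList, "nul".toList,
   "com1".toList, "com2".toList, "com3".toList, "com4".toList, "com5".toList,
   "com6".toList, "com7".toList, "com8".toList, "com9".toList,
   "lpt1".toList, "lpt2".toList, "lpt3".toList, "lpt4".toList, "lpt5".toList,
   "lpt6".toList, "lpt7".toList, "lpt8".toList, "lpt9".toList]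

lemma singleton_infix_mem (c : Char) (l : List Char) : [c] <:+: l ↔ c ∈ l := by
  constructor
  · intro h; exact h.subset (List.mem_singleton_self c)
  · intro h
    obtain ⟨s, t, rfl⟩ := List.append_of_mem h
    exact ⟨s, t, by simp⟩

-- single-character substring containment is character membership
lemma isIn_single (f : String) (c : Char) (s : String) (hs : s.toList = [c]) :
    PySem.Str.isIn s f = true ↔ c ∈ f.toList := by
  rw [PySem.Str.isIn_iff_infix, hs]
  exact singleton_infix_mem c f.toList

lemma scanCharsB_eq (L : List Char) :
    scanCharsB L = !(L.any (fun c => symbolCharsB.contains c)) := by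
  induction L with
  | nil => rfl
  | cons c rest ih =>
    simp only [scanCharsB, List.any_cons]
    cases h : symbolCharsB.contains c <;> simp [ih]

lemma checkLoopA1_nil (f : String) : checkLoopA1 [] f = true := rfl

lemma checkLoopA2_nil (f : String) : checkLoopA2 [] f = true := rfl

lemma checkLoopA1_cons (s : String) (rest : List String) (f : String) :
    checkLoopA1 (s :: rest) f = (!PySem.Str.isIn s f && checkLoopA1 rest f) := by
  simp only [checkLoopA1]
  cases h : PySem.Str.isIn s f <;> simp

lemma checkLoopA2_cons (n : String) (rest : List String) (f : String) :
    checkLoopA2 (n :: rest) f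
      = (!(PySem.Str.lower f == PySem.Str.lower n) && checkLoopA2 rest f) := by
  simp only [checkLoopA2]
  cases h : (PySem.Str.lower f == PySem.Str.lower n) <;> simp

-- A's symbol loop agrees with B's character scan
lemma loopA1_eq (filename : String) :
    checkLoopA1 pySymbols filename = scanCharsB filename.toList := by
  rw [scanCharsB_eq]
  have h1 : PySem.Str.isIn "/" filename = true ↔ '/' ∈ filename.toList := isIn_single filename '/' "/" rfl
  have h2 : PySem.Str.isIn ">" filename = true ↔ '>' ∈ filename.toList := isIn_single filename '>' ">" rfl
  have h3 : PySem.Str.isIn "<" filename = true ↔ '<' ∈ filename.toList := isIn_single filename '<' "<" rfl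
  have h4 : PySem.Str.isIn ":" filename = true ↔ ':' ∈ filename.toList := isIn_single filename ':' ":" rfl
  have h5 : PySem.Str.isIn "\\" filename = true ↔ '\\' ∈ filename.toList := isIn_single filename '\\' "\\" rfl
  have h6 : PySem.Str.isIn "|" filename = true ↔ '|' ∈ filename.toList := isIn_single filename '|' "|" rfl
  have h7 : PySem.Str.isIn "?" filename = true ↔ '?' ∈ filename.toList := isIn_single filename '?' "?" rfl
  have h8 : PySem.Str.isIn "*" filename = true ↔ '*' ∈ filename.toList := isIn_single filename '*' "*" rfl
  have hchain : checkLoopA1 pySymbols filename = !(PySem.Str.isIn "/" filename || PySem.Str.isIn ">" filename || PySem.Str.isIn "<" filename || PySem.Str.isIn ":" filename || PySem.Str.isIn "\\" filename || PySem.Str.isIn "|" filename || PySem.Str.isIn "?" filename || PySem.Str.isIn "*" filename) := by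
    simp only [pySymbols, checkLoopA1_cons, checkLoopA1_nil, Bool.not_or, Bool.and_true,
      Bool.and_assoc]
  rw [hchain]
  congr 1
  rw [Bool.eq_iff_iff]
  simp only [Bool.or_eq_true, h1, h2, h3, h4, h5, h6, h7, h8, List.any_eq_true,
    List.contains_eq_mem, decide_eq_true_eq, symbolCharsB, List.mem_cons,
    List.not_mem_nil, or_false]
  constructor
  · rintro (((((((h | h) | h) | h) | h) | h) | h) | h)
    exacts [⟨'/', h, by decide⟩, ⟨'>', h, by decide⟩, ⟨'<', h, by decide⟩, ⟨':', h, by decide⟩, ⟨'\\', h, by decide⟩, ⟨'|', h, by decide⟩, ⟨'?', h, by decide⟩, ⟨'*', h, by decide⟩]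
  · rintro ⟨c, hmem, hd⟩
    rcases hd with rfl | rfl | rfl | rfl | rfl | rfl | rfl | rfl
    exacts [Or.inl (Or.inl (Or.inl (Or.inl (Or.inl (Or.inl (Or.inl (hmem))))))), Or.inl (Or.inl (Or.inl (Or.inl (Or.inl (Or.inl (Or.inr (hmem))))))), Or.inl (Or.inl (Or.inl (Or.inl (Or.inl (Or.inr (hmem)))))), Or.inl (Or.inl (Or.inl (Or.inl (Or.inr (hmem))))), Or.inl (Or.inl (Or.inl (Or.inr (hmem)))), Or.inl (Or.inl (Or.inr (hmem))), Or.inl (Or.inr (hmem)), Or.inr (hmem)]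

-- B's structural test recognises exactly the 22 lowered reserved names
lemma reservedB_true_iff (L : List Char) : reservedB L = true ↔ L ∈ lowNamesB := by
  constructor
  · intro h
    unfold reservedB at h
    split_ifs at h with h1 h2
    · rcases h1 with rfl | rfl | rfl | rfl <;> decide
    · obtain ⟨hlen, hpre, hdig⟩ := h2
      obtain ⟨a, b, c, d, rfl⟩ : ∃ a b c d, L = [a, b, c, d] := by
        rcases L with _ | ⟨a, _ | ⟨b, _ | ⟨c, _ | ⟨d, _ | ⟨e, t⟩⟩⟩⟩⟩ <;>
          first
            | exact ⟨_, _, _, _, rfl⟩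
            | simp at hlen
      have hslice : PySem.List.slice [a, b, c, d] none (some 3) = [a, b, c] := by
        clear h1 hpre hdig; simp [pysem]
      rw [hslice] at hpre
      simp only [List.cons.injEq, and_true] at hpre
      simp only [PySem.List.pyGet?, PySem.List.pyIdx?] at hdig
      norm_num at hdig
      simp only [digitCharsB, List.mem_cons, List.not_mem_nil, or_false] at hdig
      rcases hpre with ⟨rfl, rfl, rfl⟩ | ⟨rfl, rfl, rfl⟩ <;>
        rcases hdig with rfl | rfl | rfl | rfl | rfl | rfl | rfl | rfl | rfl <;> decide
  · intro h
    fin_cases h <;> decide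

-- A's name loop agrees with B's structural classification of the lowered filename
lemma loopA2_eq (filename : String) :
    checkLoopA2 pyNames filename = !reservedB (PySem.Chars.lower filename.toList) := by
  have hname : ∀ n : String, ((PySem.Str.lower filename == PySem.Str.lower n) = true)
      ↔ PySem.Chars.lower filename.toList = (PySem.Str.lower n).toList := by
    intro n
    rw [beq_iff_eq, ← String.toList_inj, PySem.Str.toList_lower]
  have hchain : checkLoopA2 pyNames filename
      = !((PySem.Str.lower filename == PySem.Str.lower "CON") || (PySem.Str.lower filename == PySem.Str.lower "PRN") || (PySem.Str.lower filename == PySem.Str.lower "AUX") || (PySem.Str.lower filename == PySem.Str.lower "NUL") || (PySem.Str.lower filename == PySem.Str.lower "COM1") || (PySem.Str.lower filename == PySem.Str.lower "COM2") || (PySem.Str.lower filename == PySem.Str.lower "COM3") || (PySem.Str.lower filename == PySem.Str.lower "COM4") || (PySem.Str.lower filename == PySem.Str.lower "COM5") || (PySem.Str.lower filename == PySem.Str.lower "COM6") || (PySem.Str.lower filename == PySem.Str.lower "COM7") || (PySem.Str.lower filename == PySem.Str.lower "COM8") || (PySem.Str.lower filename == PySem.Str.lower "COM9") || (PySem.Str.lower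 filename == PySem.Str.lower "LPT1") || (PySem.Str.lower filename == PySem.Str.lower "LPT2") || (PySem.Str.lower filename == PySem.Str.lower "LPT3") || (PySem.Str.lower filename == PySem.Str.lower "LPT4") || (PySem.Str.lower filename == PySem.Str.lower "LPT5") || (PySem.Str.lower filename == PySem.Str.lower "LPT6") || (PySem.Str.lower filename == PySem.Str.lower "LPT7") || (PySem.Str.lower filename == PySem.Str.lower "LPT8") || (PySem.Str.lower filename == PySem.Str.lower "LPT9")) := by
    simp only [pyNames, checkLoopA2_cons, checkLoopA2_nil, Bool.not_or, Bool.and_true,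
      Bool.and_assoc]
  rw [hchain]
  congr 1
  rw [Bool.eq_iff_iff, reservedB_true_iff]
  simp only [Bool.or_eq_true, hname, lowNamesB, List.mem_cons, List.not_mem_nil, or_false,
    show (PySem.Str.lower "CON").toList = "con".toList from by decide,
    show (PySem.Str.lower "PRN").toList = "prn".toList from by decide,
    show (PySem.Str.lower "AUX").toList = "aux".toList from by decide,
    show (PySem.Str.lower "NUL").toList = "nul".toList from by decide,
    show (PySem.Str.lower "COM1").toList = "com1".toList from by decide,
    show (PySem.Str.lower "COM2").toList = "com2".toList from by decide,
    show (PySem.Str.lower "COM3").toList = "com3".toList from by decide,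
    show (PySem.Str.lower "COM4").toList = "com4".toList from by decide,
    show (PySem.Str.lower "COM5").toList = "com5".toList from by decide,
    show (PySem.Str.lower "COM6").toList = "com6".toList from by decide,
    show (PySem.Str.lower "COM7").toList = "com7".toList from by decide,
    show (PySem.Str.lower "COM8").toList = "com8".toList from by decide,
    show (PySem.Str.lower "COM9").toList = "com9".toList from by decide,
    show (PySem.Str.lower "LPT1").toList = "lpt1".toList from by decide,
    show (PySem.Str.lower "LPT2").toList = "lpt2".toList from by decide,
    show (PySem.Str.lower "LPT3").toList = "lpt3".toList from by decide,
    show (PySem.Str.lower "LPT4").toList = "lpt4".toList from by decide,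
    show (PySem.Str.lower "LPT5").toList = "lpt5".toList from by decide,
    show (PySem.Str.lower "LPT6").toList = "lpt6".toList from by decide,
    show (PySem.Str.lower "LPT7").toList = "lpt7".toList from by decide,
    show (PySem.Str.lower "LPT8").toList = "lpt8".toList from by decide,
    show (PySem.Str.lower "LPT9").toList = "lpt9".toList from by decide]
  simp only [or_assoc]

-- ===== VERDICT (by name: the statement is the Claim_ definition above) =====
theorem check_filename_spec : Claim_equal_check_filename := by
  intro filename _
  unfold Spec_check_filename check_filename check_filename_alt
  rw [loopA1_eq filename, loopA2_eq filename]
  rcases scanCharsB filename.toList with _ | _ <;>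
    rcases reservedB (PySem.Chars.lower filename.toList) with _ | _ <;> simp
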